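-- pv_equiv track=rewrite | github.com/netease-youdao/QAnything | qanything_kernel/utils/loader/pdf_data_parser.py | extract_inner_lists
-- ===== SOURCE A (Python) =====
-- def extract_inner_lists(nested_list):
--     result = []
--     for i in nested_list:
--         if isinstance(i, list):
--             if len(i) > 0 and isinstance(i[0], list):
--                 result.extend(extract_inner_lists(i))
--             else:
--                 result.append(i)
--     return result
-- ===== SOURCE B (Python) =====
-- def extract_inner_lists(nested_list):
--     result = []
--     stack = list(reversed(nested_list))
--     while stack:
--         x = stack.pop()
--         if not isinstance(x, list):
--             continue
--         if len(x) > 0 and isinstance(x[0], list):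
--             stack.extend(reversed(x))
--         else:
--             result.append(x)
--     return result
-- ===== Notes on version B (the rewrite author's own statement) =====
-- stated objective: alternative
-- what changed: Replaces A's recursive DFS with an explicit-stack iterative loop: elements are pushed in reverse and popped, so the left-to-right pre-order of leaf lists is reproduced without recursion.
import Mathlib
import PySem

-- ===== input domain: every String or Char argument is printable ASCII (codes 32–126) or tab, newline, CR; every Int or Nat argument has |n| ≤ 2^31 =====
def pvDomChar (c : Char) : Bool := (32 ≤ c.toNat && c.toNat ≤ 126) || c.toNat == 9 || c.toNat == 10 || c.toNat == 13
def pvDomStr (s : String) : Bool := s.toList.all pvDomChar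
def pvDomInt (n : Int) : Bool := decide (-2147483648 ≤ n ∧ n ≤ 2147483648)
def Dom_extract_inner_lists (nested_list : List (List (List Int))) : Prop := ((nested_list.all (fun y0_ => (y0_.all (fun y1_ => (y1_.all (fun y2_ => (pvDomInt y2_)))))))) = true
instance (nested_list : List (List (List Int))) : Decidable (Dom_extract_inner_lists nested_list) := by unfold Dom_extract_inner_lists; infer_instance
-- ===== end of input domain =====

-- B replaces A's recursive DFS by an explicit-stack iterative loop (alternative decomposition, same cost); return-value equivalence.

-- ===== PORT A =====
-- A's recursion, at the typed depth List (List (List Int)), unrolls to two levels.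
-- Level 1 (the recursive call on i : List (List Int)): each j is a list (isinstance
-- true) and j[0] is an Int, never a list, so the loop always appends j.
def pvA_inner (lst : List (List Int)) : List (List Int) :=
  lst.foldl (fun result j => result ++ [j]) []

-- Outer level: every i is a list; when i is nonempty, i[0] is a list, so the condition
-- `len(i) > 0 and isinstance(i[0], list)` is i.length > 0; in the else branch i = []
-- and Python appends i itself, i.e. the empty inner list.
def extract_inner_lists (nested_list : List (List (List Int))) : List (List Int) :=
  nested_list.foldl
    (fun result i => if i.length > 0 then result ++ pvA_inner i else result ++ [[]]) []

-- ===== PORT B =====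
-- Stack items are top-level elements (inl) or pushed inner lists (inr). The stack's
-- top is the list HEAD here, so Python's `reversed` pushes (last pushed popped first)
-- appear as pushing x's elements head-first, and the initial `list(reversed(...))`
-- as the list itself.
def pvWeight (x : List (List Int) ⊕ List Int) : Nat :=
  match x with
  | .inl l => l.length + 1
  | .inr _ => 1

theorem pvWeight_inr_sum (l : List (List Int)) : (l.map (pvWeight ∘ Sum.inr)).sum = l.length := by
  induction l with
  | nil => rfl
  | cons a t ih => simp [Function.comp, pvWeight, ih]; omega

def pvLoop (stack : List (List (List Int) ⊕ List Int)) (result : List (List Int)) :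
    List (List Int) :=
  match stack with
  | [] => result
  | x :: rest =>
    match x with
    | .inl l =>
      -- x is a list; `len(x) > 0 and isinstance(x[0], list)` is l.length > 0 here
      if l.length > 0 then pvLoop (l.map Sum.inr ++ rest) result
      else pvLoop rest (result ++ [[]])   -- l = []: append the empty leaf list
    | .inr l => pvLoop rest (result ++ [l])  -- inner list is a leaf: append it
termination_by (stack.map pvWeight).sum
decreasing_by
  · simp [pvWeight, List.map_map, pvWeight_inr_sum]
  · simp [pvWeight]
  · simp [pvWeight]

def extract_inner_lists_alt (nested_list : List (List (List Int))) : List (List Int) :=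
  pvLoop (nested_list.map Sum.inl) []

-- ===== PRECONDITION & SPEC =====
def Spec_extract_inner_lists (nested_list : List (List (List Int))) (out : List (List Int)) : Prop := out = extract_inner_lists_alt nested_list
instance (nested_list : List (List (List Int))) (out : List (List Int)) : Decidable (Spec_extract_inner_lists nested_list out) := by unfold Spec_extract_inner_lists; infer_instance

-- ===== CLAIM (what is proved, stated in full; the proofs are below) =====
def Claim_equal_extract_inner_lists : Prop := ∀ (nested_list : List (List (List Int))), Dom_extract_inner_lists nested_list → Spec_extract_inner_lists nested_list (extract_inner_lists nested_list)

-- ===== LEMMAS AND PROOFS =====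

-- the common denotation: each leaf list, left to right; an empty group yields one []
def pvFlat (x : List (List Int) ⊕ List Int) : List (List Int) :=
  match x with
  | .inl l => if l.length > 0 then l else [[]]
  | .inr l => [l]

theorem pvA_inner_eq (lst : List (List Int)) : pvA_inner lst = lst := by
  suffices h : ∀ acc, lst.foldl (fun result j => result ++ [j]) acc = acc ++ lst by
    simpa [pvA_inner] using h []
  induction lst with
  | nil => simp
  | cons j t ih => intro acc; simp [List.foldl_cons, ih]

theorem pvA_eq (nested_list : List (List (List Int))) :
    extract_inner_lists nested_list = (nested_list.map Sum.inl).flatMap pvFlat := by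
  suffices h : ∀ acc, nested_list.foldl
      (fun result i => if i.length > 0 then result ++ pvA_inner i else result ++ [[]]) acc
      = acc ++ (nested_list.map Sum.inl).flatMap pvFlat by
    simpa [extract_inner_lists] using h []
  induction nested_list with
  | nil => simp
  | cons i t ih =>
    intro acc
    rw [List.foldl_cons, ih]
    by_cases hi : i.length > 0
    · simp [hi, pvFlat, pvA_inner_eq]
    · simp [hi, pvFlat]

theorem pvLoop_eq (stack : List (List (List Int) ⊕ List Int)) (result : List (List Int)) :
    pvLoop stack result = result ++ stack.flatMap pvFlat := by
  induction stack, result using pvLoop.induct with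
  | case1 result => simp [pvLoop]
  | case2 result rest l hl ih =>
    simp only [List.map_attach_eq_pmap, List.pmap_eq_map] at ih
    rw [pvLoop, if_pos hl, ih]
    simp [List.flatMap_append, List.flatMap_map, pvFlat, hl]
  | case3 result rest l hl ih =>
    rw [pvLoop, if_neg hl, ih]
    simp [pvFlat, hl]
  | case4 result rest l ih =>
    rw [pvLoop, ih]
    simp [pvFlat]

-- ===== VERDICT (by name: the statement is the Claim_ definition above) =====
theorem extract_inner_lists_spec : Claim_equal_extract_inner_lists := by
  intro nested_list _
  unfold Spec_extract_inner_lists extract_inner_lists_alt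
  rw [pvA_eq, pvLoop_eq]
  simp
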